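-- pv_equiv track=rewrite | github.com/elison-maiko/Sistemas_de_comunicao-Python | SISCOM_Codificacadao_dados.py | cod_2BQ1
-- ===== SOURCE A (Python) =====
-- def cod_2BQ1 (sinal):
--     mapping =  {
--         '00': 1,
--         '01': 3,
--         '10': -1,
--         '11': -3
--     }
--     sinais_tensao = []
--     nivel_anterior = 1
--     for i in range(0, len(sinal), 2):       #Ir pegando duplas de bits
--         dupla = mapping[sinal[i:i+2]]       #converte pra inteiro, de 2 em 2 da string sinal
--         if nivel_anterior > 0:              #condição pra invesões
--             sinais_tensao.append(dupla)               #adiciona o inteiro a string de codificação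
--             nivel_anterior = dupla          #Atualiza o nivel para verificação no proximo loop
--         else :
--             sinais_tensao.append(-dupla)
--             nivel_anterior = -dupla
--     return sinais_tensao
-- ===== SOURCE B (Python) =====
-- def cod_2BQ1(sinal):
--     mapping = {
--         '00': 1,
--         '01': 3,
--         '10': -1,
--         '11': -3
--     }
--     # Pass 1: map every bit pair to its base level.
--     vals = [mapping[sinal[i:i+2]] for i in range(0, len(sinal), 2)]
--     # Pass 2: running product of the per-pair signs (seeded positive).
--     signs = []
--     s = 1
--     for v in vals:
--         s *= 1 if v > 0 else -1
--         signs.append(s)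
--     # Output magnitude is fixed by the pair; only the sign is history-dependent.
--     return [s * abs(v) for s, v in zip(signs, vals)]
-- ===== Notes on version B (the rewrite author's own statement) =====
-- stated objective: alternative
-- what changed: Replaces the single stateful loop carrying the previous output level by two passes: map all bit pairs to base levels, then apply a running product of per-pair signs (seeded positive) and recombine sign with magnitude.
import Mathlib
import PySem

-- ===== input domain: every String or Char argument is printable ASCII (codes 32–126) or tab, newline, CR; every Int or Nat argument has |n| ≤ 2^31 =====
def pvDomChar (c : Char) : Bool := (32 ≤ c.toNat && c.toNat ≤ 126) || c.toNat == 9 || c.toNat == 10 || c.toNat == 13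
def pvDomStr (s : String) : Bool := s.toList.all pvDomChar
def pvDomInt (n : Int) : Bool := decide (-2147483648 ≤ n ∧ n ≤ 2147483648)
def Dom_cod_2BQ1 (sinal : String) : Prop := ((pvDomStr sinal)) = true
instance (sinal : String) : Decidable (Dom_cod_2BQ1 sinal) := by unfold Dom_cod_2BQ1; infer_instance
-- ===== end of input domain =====

-- B replaces A's stateful previous-level loop by two passes: map pairs to base levels, then a running sign product recombined with magnitudes (alternative decomposition, same cost).


-- ===== PORT A =====
-- the 2B1Q dict literal (appears verbatim in both Pythons)
def pvMapping : PySem.Dict String Int :=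
  PySem.Dict.ofList [("00", 1), ("01", 3), ("10", -1), ("11", -3)]

def cod_2BQ1 (sinal : String) : List Int :=
  ((PySem.List.pyRange 0 (PySem.Str.len sinal) 2).foldl
    (fun (st : List Int × Int) i =>
      let dupla := pvMapping.getD (PySem.Str.slice sinal (some i) (some (i + 2))) 0
      if st.2 > 0 then (st.1 ++ [dupla], dupla) else (st.1 ++ [-dupla], -dupla))
    ([], 1)).1

-- ===== PORT B =====
-- B's pass-2 loop: running product of per-pair signs, appended as it goes
def pvSigns : List Int → Int → List Int
  | [], _ => []
  | v :: rest, s =>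
    let s' := s * (if v > 0 then 1 else -1)
    s' :: pvSigns rest s'

def cod_2BQ1_alt (sinal : String) : List Int :=
  let vals := (PySem.List.pyRange 0 (PySem.Str.len sinal) 2).map
    (fun i => pvMapping.getD (PySem.Str.slice sinal (some i) (some (i + 2))) 0)
  let signs := pvSigns vals 1
  (signs.zip vals).map (fun p => p.1 * |p.2|)

-- ===== PRECONDITION & SPEC =====
-- Pre_ excludes exactly the inputs on which the Python A raises KeyError: strings of odd length or containing a non-bit character.
def Pre_cod_2BQ1 (sinal : String) : Prop :=
  sinal.toList.length % 2 = 0 ∧ (sinal.toList.all (fun c => c == '0' || c == '1')) = true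
instance (sinal : String) : Decidable (Pre_cod_2BQ1 sinal) := by unfold Pre_cod_2BQ1; infer_instance
def pvWitness_cod_2BQ1 : String := "01"
def Spec_cod_2BQ1 (sinal : String) (out : List Int) : Prop := out = cod_2BQ1_alt sinal
instance (sinal : String) (out : List Int) : Decidable (Spec_cod_2BQ1 sinal out) := by unfold Spec_cod_2BQ1; infer_instance

-- ===== CLAIM (what is proved, stated in full; the proofs are below) =====
def Claim_equal_cod_2BQ1 : Prop := ∀ (sinal : String), Dom_cod_2BQ1 sinal → Pre_cod_2BQ1 sinal → Spec_cod_2BQ1 sinal (cod_2BQ1 sinal)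

-- ===== LEMMAS AND PROOFS =====

-- core invariant: A's fold over the level list equals acc ++ B's sign-product form,
-- provided the carried level is positive iff the carried sign is 1
lemma pv_fold_eq_signs : ∀ (vals : List Int) (acc : List Int) (nivel s : Int),
    (∀ v ∈ vals, v ≠ 0) → (0 < nivel ↔ s = 1) → (s = 1 ∨ s = -1) →
    (vals.foldl
      (fun (st : List Int × Int) v =>
        if st.2 > 0 then (st.1 ++ [v], v) else (st.1 ++ [-v], -v)) (acc, nivel)).1
    = acc ++ ((pvSigns vals s).zip vals).map (fun p => p.1 * |p.2|) := by
  intro vals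
  induction vals with
  | nil => intro acc nivel s _ _ _; simp [pvSigns]
  | cons v rest ih =>
    intro acc nivel s hnz hinv hs
    have hv : v ≠ 0 := hnz v (by simp)
    have hrest : ∀ x ∈ rest, x ≠ 0 := fun x hx => hnz x (by simp [hx])
    simp only [List.foldl_cons, pvSigns]
    rcases hs with h1 | h1
    · subst h1
      have hpos : 0 < nivel := hinv.mpr rfl
      rw [if_pos hpos]
      by_cases hvp : 0 < v
      · rw [ih (acc ++ [v]) v (1 * 1) hrest (by constructor <;> intro <;> omega) (Or.inl (by ring))]
        simp only [if_pos hvp]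
        simp [abs_of_pos hvp]
      · have hvneg : v < 0 := lt_of_le_of_ne (not_lt.mp hvp) hv
        rw [ih (acc ++ [v]) v (1 * -1) hrest (by constructor <;> intro h <;> omega) (Or.inr (by ring))]
        simp only [if_neg (by omega : ¬ v > 0)]
        simp [abs_of_neg hvneg]
    · subst h1
      have hneg : ¬ nivel > 0 := by
        intro h; have := hinv.mp h; omega
      rw [if_neg hneg]
      by_cases hvp : 0 < v
      · rw [ih (acc ++ [-v]) (-v) (-1 * 1) hrest (by constructor <;> intro h <;> omega) (Or.inr (by ring))]
        simp only [if_pos hvp]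
        simp [abs_of_pos hvp]
      · have hvneg : v < 0 := lt_of_le_of_ne (not_lt.mp hvp) hv
        rw [ih (acc ++ [-v]) (-v) (-1 * -1) hrest (by constructor <;> intro h <;> omega) (Or.inl (by ring))]
        simp only [if_neg (by omega : ¬ v > 0)]
        simp [abs_of_neg hvneg]

-- every bit pair of a valid even-length 0/1 string maps to a nonzero level
lemma pv_vals_ne_zero (sinal : String) (h : Pre_cod_2BQ1 sinal) :
    ∀ i ∈ PySem.List.pyRange 0 (PySem.Str.len sinal) 2,
      pvMapping.getD (PySem.Str.slice sinal (some i) (some (i + 2))) 0 ≠ 0 := by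
  obtain ⟨heven, hall⟩ := h
  have hchars : ∀ c ∈ sinal.toList, c = '0' ∨ c = '1' := by
    intro c hc
    have := List.all_eq_true.mp hall c hc
    simpa using this
  intro i hi
  rw [PySem.Str.len_eq, PySem.List.mem_pyRange_iff_of_pos (by norm_num)] at hi
  obtain ⟨h0, hlt, hdvd⟩ := hi
  obtain ⟨m, hm⟩ : (2:Int) ∣ i := by simpa using hdvd
  have h2 : i + 2 ≤ (sinal.toList.length : Int) := by omega
  have hk : i.toNat < sinal.toList.length := by omega
  have hk1 : i.toNat + 1 < sinal.toList.length := by omega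
  have hsl : PySem.Str.slice sinal (some i) (some (i + 2))
      = String.ofList [sinal.toList[i.toNat], sinal.toList[i.toNat + 1]] := by
    simp only [PySem.Str.slice, PySem.Chars.slice]
    rw [PySem.List.slice_of_nonneg sinal.toList h0 (by omega) (by omega) h2]
    have hc : (i + 2).toNat - i.toNat = 2 := by omega
    rw [hc, List.drop_eq_getElem_cons hk, List.drop_eq_getElem_cons hk1]
    rfl
  have ha := hchars sinal.toList[i.toNat] (List.getElem_mem hk)
  have hb := hchars sinal.toList[i.toNat + 1] (List.getElem_mem hk1)
  rcases ha with ha | ha <;> rcases hb with hb | hb <;>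
    rw [hsl, ha, hb] <;> decide

-- ===== VERDICT (by name: the statement is the Claim_ definition above) =====
theorem cod_2BQ1_spec : Claim_equal_cod_2BQ1 := by
  intro sinal _ hpre
  unfold Spec_cod_2BQ1 cod_2BQ1 cod_2BQ1_alt
  rw [← List.foldl_map
    (f := fun i => pvMapping.getD (PySem.Str.slice sinal (some i) (some (i + 2))) 0)
    (g := fun (st : List Int × Int) v =>
      if st.2 > 0 then (st.1 ++ [v], v) else (st.1 ++ [-v], -v))]
  rw [pv_fold_eq_signs _ [] 1 1 ?hnz (by norm_num) (Or.inl rfl)]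
  · simp
  · intro v hv
    rcases List.mem_map.mp hv with ⟨i, hi, rfl⟩
    exact pv_vals_ne_zero sinal hpre i hi
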